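-- pv_equiv track=rewrite | github.com/KwonYoungbin/Programmers-Practice | Python/Level4/지형 편집.py | solution
-- ===== SOURCE A (Python) =====
-- def solution(land, P, Q):
--     heights = []
--     for l in land:
--         heights += l
--     heights.sort()
--
--     length = len(heights)
--     answer = sum(heights) * Q  # 0층에 맞출 때.
--     cost = (sum(heights) - heights[0] * length) * Q  # 가장 낮은 층 높이에 맞춰 블록을 만드는 경우.
--     answer = min(answer, cost)
--
--     for i in range(1, length):
--         if heights[i] != heights[i - 1]:
--             cost += (P * i * (heights[i] - heights[i - 1])) - (Q * (length - i) * (heights[i] - heights[i - 1]))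
--             answer = min(answer, cost)      # i번째를 기준으로 왼쪽은 높이고, 오른쪽은 낮춰줌
--
--     return answer
-- ===== SOURCE B (Python) =====
-- def solution(land, P, Q):
--     heights = sorted(x for row in land for x in row)
--     L = len(heights)
--     total = sum(heights)
--     best = total * Q
--     s = 0  # running prefix sum: sum of heights[:i]
--     for i, h in enumerate(heights):
--         best = min(best, P * (h * i - s) + Q * ((total - s) - h * (L - i)))
--         s += h
--     return best
-- ===== Notes on version B (the rewrite author's own statement) =====
-- stated objective: simpler
-- what changed: A maintains the leveling cost via an incremental slope recurrence updated only at indices where adjacent sorted heights differ; B instead evaluates each candidate target height by an independent closed-form expression from a running prefix sum (no adjacency test, no cost recurrence), taking the minimum over all positions plus the height-0 candidate.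
import Mathlib
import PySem

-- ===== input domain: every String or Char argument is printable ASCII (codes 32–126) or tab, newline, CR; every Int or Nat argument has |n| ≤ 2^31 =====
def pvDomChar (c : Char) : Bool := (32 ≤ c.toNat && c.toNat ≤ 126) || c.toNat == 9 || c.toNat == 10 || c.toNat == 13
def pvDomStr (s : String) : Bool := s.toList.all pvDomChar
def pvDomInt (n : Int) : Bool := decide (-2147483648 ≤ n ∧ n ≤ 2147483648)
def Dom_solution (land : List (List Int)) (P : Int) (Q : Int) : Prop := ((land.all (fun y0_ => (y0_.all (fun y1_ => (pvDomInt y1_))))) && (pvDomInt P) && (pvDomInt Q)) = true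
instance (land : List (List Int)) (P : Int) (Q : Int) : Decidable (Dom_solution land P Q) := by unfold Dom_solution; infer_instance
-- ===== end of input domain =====

-- B replaces A's incremental slope-recurrence (updated only at distinct adjacent sorted heights)
-- by an independent closed-form cost per position computed from a running prefix sum; same O(n log n) cost.

-- ===== PORT A =====
def solution (land : List (List Int)) (P : Int) (Q : Int) : Int :=
  let heights := PySem.List.sorted (land.foldl (fun acc l => acc ++ l) ([] : List Int)) (fun x => x) false
  let length : Int := heights.length
  match PySem.List.pyGet? heights 0 with
  | none => 0  -- Python raises IndexError here; excluded by Pre_solution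
  | some h0 =>
    let answer := heights.sum * Q
    let cost := (heights.sum - h0 * length) * Q
    let answer := min answer cost
    let res := (PySem.List.pyRange 1 length 1).foldl (fun (st : Int × Int) i =>
      if PySem.List.pyGetD heights i 0 ≠ PySem.List.pyGetD heights (i - 1) 0 then
        let cost := st.2 + ((P * i * (PySem.List.pyGetD heights i 0 - PySem.List.pyGetD heights (i - 1) 0))
                            - (Q * (length - i) * (PySem.List.pyGetD heights i 0 - PySem.List.pyGetD heights (i - 1) 0)))
        (min st.1 cost, cost)
      else st) (answer, cost)
    res.1

-- ===== PORT B =====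
def solution_alt (land : List (List Int)) (P : Int) (Q : Int) : Int :=
  let heights := PySem.List.sorted (land.flatMap (fun row => row)) (fun x => x) false
  let L : Int := heights.length
  let total := heights.sum
  let res := (PySem.List.enumerate heights 0).foldl (fun (st : Int × Int) ih =>
      (min st.1 (P * (ih.2 * ih.1 - st.2) + Q * ((total - st.2) - ih.2 * (L - ih.1))), st.2 + ih.2))
    (total * Q, 0)
  res.1

-- ===== PRECONDITION & SPEC =====
-- Pre_ excludes exactly the inputs with no cells at all (every row empty), on which A raises IndexError.
def Pre_solution (land : List (List Int)) (P : Int) (Q : Int) : Prop :=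
  land.flatMap (fun row => row) ≠ []
instance (land : List (List Int)) (P : Int) (Q : Int) : Decidable (Pre_solution land P Q) := by
  unfold Pre_solution; infer_instance

def pvWitness_solution : List (List Int) × Int × Int := ([[1, 2], [3, 1]], 2, 3)

def Spec_solution (land : List (List Int)) (P : Int) (Q : Int) (out : Int) : Prop := out = solution_alt land P Q
instance (land : List (List Int)) (P : Int) (Q : Int) (out : Int) : Decidable (Spec_solution land P Q out) := by unfold Spec_solution; infer_instance

-- ===== CLAIM (what is proved, stated in full; the proofs are below) =====
def Claim_equal_solution : Prop := ∀ (land : List (List Int)) (P : Int) (Q : Int), Dom_solution land P Q → Pre_solution land P Q → Spec_solution land P Q (solution land P Q)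

-- ===== LEMMAS AND PROOFS =====

-- closed-form cost of leveling to the height at sorted position k
def gg (hs : List Int) (P Q : Int) (k : Nat) : Int :=
  P * (hs.getD k 0 * k - (hs.take k).sum)
    + Q * ((hs.sum - (hs.take k).sum) - hs.getD k 0 * ((hs.length : Int) - k))

-- running minimum over the height-0 candidate and the first k positional candidates
def mm (hs : List Int) (P Q : Int) (k : Nat) : Int :=
  (List.range k).foldl (fun a i => min a (gg hs P Q i)) (hs.sum * Q)

theorem mm_succ (hs : List Int) (P Q : Int) (k : Nat) :
    mm hs P Q (k + 1) = min (mm hs P Q k) (gg hs P Q k) := by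
  simp [mm, List.range_succ]

theorem sum_take_succ_getD (hs : List Int) (k : Nat) (hk : k < hs.length) :
    (hs.take (k + 1)).sum = (hs.take k).sum + hs.getD k 0 := by
  rw [List.getD_eq_getElem _ _ hk]
  exact List.sum_take_succ hs k hk

-- if two adjacent sorted heights are equal the closed-form cost is unchanged
theorem gg_eq_of_adj_eq (hs : List Int) (P Q : Int) (k : Nat) (h1 : 1 ≤ k) (hk : k < hs.length)
    (heq : hs.getD k 0 = hs.getD (k - 1) 0) :
    gg hs P Q k = gg hs P Q (k - 1) := by
  obtain ⟨j, rfl⟩ : ∃ j, k = j + 1 := ⟨k - 1, by omega⟩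
  simp only [Nat.add_sub_cancel] at heq ⊢
  unfold gg
  rw [sum_take_succ_getD hs j (by omega), heq]
  push_cast
  ring

-- the slope-recurrence update is exactly the difference of adjacent closed-form costs
theorem gg_step (hs : List Int) (P Q : Int) (k : Nat) (h1 : 1 ≤ k) (hk : k < hs.length) :
    gg hs P Q k = gg hs P Q (k - 1)
      + ((P * k * (hs.getD k 0 - hs.getD (k - 1) 0))
         - (Q * ((hs.length : Int) - k) * (hs.getD k 0 - hs.getD (k - 1) 0))) := by
  obtain ⟨j, rfl⟩ : ∃ j, k = j + 1 := ⟨k - 1, by omega⟩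
  simp only [Nat.add_sub_cancel]
  unfold gg
  rw [sum_take_succ_getD hs j (by omega)]
  push_cast
  ring

theorem mm_le_gg (hs : List Int) (P Q : Int) (k : Nat) (h1 : 1 ≤ k) :
    mm hs P Q k ≤ gg hs P Q (k - 1) := by
  obtain ⟨j, rfl⟩ : ∃ j, k = j + 1 := ⟨k - 1, by omega⟩
  simp only [Nat.add_sub_cancel, mm_succ]
  exact min_le_right _ _

-- invariant of A's loop: after the range [1, k) the cost is gg (k-1) and the answer is mm k
theorem A_loop (hs : List Int) (P Q : Int) (k : Nat) (h1 : 1 ≤ k) (hk : k ≤ hs.length) :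
    ((PySem.List.pyRange 1 (k : Int) 1).foldl (fun (st : Int × Int) i =>
      if PySem.List.pyGetD hs i 0 ≠ PySem.List.pyGetD hs (i - 1) 0 then
        let cost := st.2 + ((P * i * (PySem.List.pyGetD hs i 0 - PySem.List.pyGetD hs (i - 1) 0))
                            - (Q * ((hs.length : Int) - i) * (PySem.List.pyGetD hs i 0 - PySem.List.pyGetD hs (i - 1) 0)))
        (min st.1 cost, cost)
      else st) (min (hs.sum * Q) (gg hs P Q 0), gg hs P Q 0))
    = (mm hs P Q k, gg hs P Q (k - 1)) := by
  induction k with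
  | zero => omega
  | succ n ih =>
    rcases Nat.eq_or_lt_of_le h1 with h | h
    · -- k = 1 : empty range
      rw [← h]
      rw [PySem.List.pyRange_one_eq_nil (by norm_num)]
      simp [mm, List.range_succ, List.range_zero]
    · have hn1 : 1 ≤ n := by omega
      have hnlen : n < hs.length := by omega
      have hsplit : PySem.List.pyRange 1 ((n + 1 : Nat) : Int) 1
          = PySem.List.pyRange 1 (n : Int) 1 ++ [(n : Int)] := by
        have := PySem.List.pyRange_one_succ_right (a := 1) (b := (n : Int)) (by exact_mod_cast hn1)
        push_cast
        convert this using 2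
      rw [hsplit, List.foldl_append, ih hn1 (by omega)]
      simp only [List.foldl_cons, List.foldl_nil]
      have hcast : ((n : Int) - 1) = ((n - 1 : Nat) : Int) := by push_cast [hn1]; ring
      rw [hcast]
      simp only [PySem.List.pyGetD_natCast]
      by_cases hne : hs.getD n 0 = hs.getD (n - 1) 0
      · rw [if_neg (by simpa using hne)]
        have hgg : gg hs P Q n = gg hs P Q (n - 1) := gg_eq_of_adj_eq hs P Q n hn1 hnlen hne
        have hmm : mm hs P Q (n + 1) = mm hs P Q n := by
          rw [mm_succ, hgg, min_eq_left (mm_le_gg hs P Q n hn1)]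
        rw [hmm, Nat.add_sub_cancel, hgg]
      · rw [if_pos (by simpa using hne)]
        have hgg := gg_step hs P Q n hn1 hnlen
        rw [Nat.add_sub_cancel, mm_succ, hgg]

-- invariant of B's loop: after the first n positions the state is (mm n, prefix sum of n)
theorem B_loop (hs : List Int) (P Q : Int) (n : Nat) (hn : n ≤ hs.length) :
    ((List.range n).foldl (fun (st : Int × Int) (k : Nat) =>
        (min st.1 (P * (hs.getD k 0 * k - st.2)
            + Q * ((hs.sum - st.2) - hs.getD k 0 * ((hs.length : Int) - k))), st.2 + hs.getD k 0))
      (hs.sum * Q, 0))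
    = (mm hs P Q n, (hs.take n).sum) := by
  induction n with
  | zero => simp [mm]
  | succ m ih =>
    rw [List.range_succ, List.foldl_append, ih (by omega)]
    simp only [List.foldl_cons, List.foldl_nil]
    rw [mm_succ, sum_take_succ_getD hs m (by omega)]
    simp [gg]

theorem gg_zero (hs : List Int) (P Q : Int) :
    gg hs P Q 0 = (hs.sum - hs.getD 0 0 * (hs.length : Int)) * Q := by
  simp [gg]; ring

-- A's whole body and B's whole body on the shared sorted list agree
theorem core (hs : List Int) (P Q : Int) (hsne : hs ≠ []) :
    (match PySem.List.pyGet? hs 0 with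
     | none => (0 : Int)
     | some h0 =>
       ((PySem.List.pyRange 1 ((hs.length : Int)) 1).foldl (fun (st : Int × Int) i =>
          if PySem.List.pyGetD hs i 0 ≠ PySem.List.pyGetD hs (i - 1) 0 then
            let cost := st.2 + ((P * i * (PySem.List.pyGetD hs i 0 - PySem.List.pyGetD hs (i - 1) 0))
                                - (Q * ((hs.length : Int) - i) * (PySem.List.pyGetD hs i 0 - PySem.List.pyGetD hs (i - 1) 0)))
            (min st.1 cost, cost)
          else st)
         (min (hs.sum * Q) ((hs.sum - h0 * (hs.length : Int)) * Q), (hs.sum - h0 * (hs.length : Int)) * Q)).1)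
    = ((PySem.List.enumerate hs 0).foldl (fun (st : Int × Int) ih =>
        (min st.1 (P * (ih.2 * ih.1 - st.2) + Q * ((hs.sum - st.2) - ih.2 * ((hs.length : Int) - ih.1))), st.2 + ih.2))
       (hs.sum * Q, 0)).1 := by
  have hlen : 1 ≤ hs.length := by
    cases hs with
    | nil => exact absurd rfl hsne
    | cons a t => simp
  obtain ⟨h0, hh0⟩ : ∃ h0, PySem.List.pyGet? hs 0 = some h0 := by
    cases hs with
    | nil => exact absurd rfl hsne
    | cons a t => exact ⟨a, by simp [PySem.List.pyGet?_zero]⟩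
  rw [hh0]
  dsimp only []
  have hh0' : hs.getD 0 0 = h0 := by
    cases hs with
    | nil => exact absurd rfl hsne
    | cons a t => simp_all [PySem.List.pyGet?_zero, List.getD]
  have hinit : (hs.sum - h0 * (hs.length : Int)) * Q = gg hs P Q 0 := by
    rw [gg_zero, hh0']
  rw [hinit]
  rw [A_loop hs P Q hs.length hlen le_rfl]
  rw [PySem.List.enumerate_eq_map_pyRange (xs := hs) (d := 0), List.foldl_map,
      PySem.List.pyRange_one]
  simp only [Int.sub_zero, PySem.List.len_eq, Int.toNat_natCast, List.foldl_map, zero_add,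
    PySem.List.pyGetD_natCast, ← List.getD_eq_getElem?_getD]
  rw [B_loop hs P Q hs.length le_rfl]

-- ===== VERDICT (by name: the statement is the Claim_ definition above) =====
theorem solution_spec : Claim_equal_solution := by
  intro land P Q _hdom hpre
  unfold Spec_solution solution solution_alt
  have hflat : land.foldl (fun acc l => acc ++ l) ([] : List Int) = land.flatMap (fun row => row) := by
    simpa using PySem.List.foldl_append_eq_flatMap (l := land) (g := fun row => row) (acc := [])
  rw [hflat]
  have hsne : PySem.List.sorted (land.flatMap (fun row => row)) (fun x => x) false ≠ [] := by
    rw [Ne, PySem.List.sorted_eq_nil_iff]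
    exact hpre
  exact core _ P Q hsne
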